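-- pv_equiv track=rewrite | github.com/qtbodart/Work | Advent of Code 2023/Day 18/adventofcode18.py | calcVolume
-- ===== SOURCE A (Python) =====
-- def calcVolume(sortedIndexes):
--     output = 0
--     cur = 0
--     counts = True
--     while(cur<len(sortedIndexes)):
--         if (cur+1 == len(sortedIndexes)):
--             break
--         if (sortedIndexes[cur+1] == sortedIndexes[cur]+1):
--             output += 1
--             cur += 1
--             continue
--         if counts:
--             output += sortedIndexes[cur+1]-sortedIndexes[cur]+1
--             cur += 1
--             counts = False
--             continue
--         if not counts:
--             counts = True
--             cur += 1
--     return output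
-- ===== SOURCE B (Python) =====
-- def calcVolume(sortedIndexes):
--     pairs = list(zip(sortedIndexes, sortedIndexes[1:]))
--     consec = sum(1 for a, b in pairs if b == a + 1)
--     gaps = [b - a for a, b in pairs if b != a + 1]
--     return consec + sum(g + 1 for i, g in enumerate(gaps) if i % 2 == 0)
-- ===== Notes on version B (the rewrite author's own statement) =====
-- stated objective: simpler
-- what changed: Replaces A's stateful while-loop (index cursor plus a boolean toggle) with a stateless partition of adjacent pairs: count consecutive pairs, then add gap+1 for non-consecutive gaps at even positions.
import Mathlib
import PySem

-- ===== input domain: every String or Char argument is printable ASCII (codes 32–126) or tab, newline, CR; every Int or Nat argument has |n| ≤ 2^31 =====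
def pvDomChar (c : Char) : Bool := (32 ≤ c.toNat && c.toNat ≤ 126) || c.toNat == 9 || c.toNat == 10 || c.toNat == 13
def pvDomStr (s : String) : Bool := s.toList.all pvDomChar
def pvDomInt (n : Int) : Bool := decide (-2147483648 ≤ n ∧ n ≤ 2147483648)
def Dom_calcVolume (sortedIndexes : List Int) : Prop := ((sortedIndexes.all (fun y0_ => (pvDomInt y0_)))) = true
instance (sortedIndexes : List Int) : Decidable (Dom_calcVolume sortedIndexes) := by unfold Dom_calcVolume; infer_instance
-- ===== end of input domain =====

-- B replaces A's stateful while-loop toggle with a partition of adjacent pairs: count the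
-- consecutive pairs, then add gap+1 for the non-consecutive gaps at even positions (objective: simpler).

-- ===== PORT A =====
-- A's while loop: cur and counts are the loop state; indices cur, cur+1 are always in range
-- when read (guards checked first), so List.getD is exact for Python's sortedIndexes[cur].
def calcVolumeLoop (xs : List Int) (output : Int) (cur : Nat) (counts : Bool) : Int :=
  if _h : cur < xs.length then
    if cur + 1 = xs.length then output
    else if xs.getD (cur+1) 0 = xs.getD cur 0 + 1 then
      calcVolumeLoop xs (output + 1) (cur+1) counts
    else if counts then
      calcVolumeLoop xs (output + (xs.getD (cur+1) 0 - xs.getD cur 0 + 1)) (cur+1) false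
    else
      calcVolumeLoop xs output (cur+1) true
  else output
termination_by xs.length - cur

def calcVolume (sortedIndexes : List Int) : Int :=
  calcVolumeLoop sortedIndexes 0 0 true

-- ===== PORT B =====
def calcVolume_alt (sortedIndexes : List Int) : Int :=
  let pairs := sortedIndexes.zip sortedIndexes.tail
  let consec : Int := (pairs.countP (fun p => p.2 == p.1 + 1) : Int)
  let gaps := (pairs.filter (fun p => p.2 != p.1 + 1)).map (fun p => p.2 - p.1)
  consec + ((gaps.zipIdx.map (fun gi => if gi.2 % 2 == 0 then gi.1 + 1 else 0)).sum)

-- ===== PRECONDITION & SPEC =====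
def Spec_calcVolume (sortedIndexes : List Int) (out : Int) : Prop := out = calcVolume_alt sortedIndexes
instance (sortedIndexes : List Int) (out : Int) : Decidable (Spec_calcVolume sortedIndexes out) := by unfold Spec_calcVolume; infer_instance

-- ===== CLAIM (what is proved, stated in full; the proofs are below) =====
def Claim_equal_calcVolume : Prop := ∀ (sortedIndexes : List Int), Dom_calcVolume sortedIndexes → Spec_calcVolume sortedIndexes (calcVolume sortedIndexes)

-- ===== LEMMAS AND PROOFS =====

-- abstract version of A's loop over the list of adjacent pairs
def goPairs : List (Int × Int) → Bool → Int
  | [], _ => 0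
  | p :: ps, counts =>
    if p.2 = p.1 + 1 then 1 + goPairs ps counts
    else if counts then (p.2 - p.1 + 1) + goPairs ps false
    else goPairs ps true

-- sum of (g+1) at alternating positions, starting "on" iff b
def paritySum : List Int → Bool → Int
  | [], _ => 0
  | g :: gs, b => (if b then g + 1 else 0) + paritySum gs (!b)

lemma drop_pairs_cons (xs : List Int) (cur : Nat) (h : cur + 1 < xs.length) :
    (xs.drop cur).zip (xs.drop cur).tail
      = (xs.getD cur 0, xs.getD (cur+1) 0)
          :: ((xs.drop (cur+1)).zip (xs.drop (cur+1)).tail) := by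
  have h0 : cur < xs.length := Nat.lt_of_succ_lt h
  have e1 : xs.drop cur = xs[cur] :: xs.drop (cur+1) := List.drop_eq_getElem_cons h0
  have e2 : xs.drop (cur+1) = xs[cur+1] :: xs.drop (cur+1+1) := List.drop_eq_getElem_cons h
  have g1 : xs.getD cur 0 = xs[cur] := by simp [List.getD, List.getElem?_eq_getElem, h0]
  have g2 : xs.getD (cur+1) 0 = xs[cur+1] := by simp [List.getD, List.getElem?_eq_getElem, h]
  rw [g1, g2, e1, e2]
  simp only [List.zip_cons_cons, List.tail_cons]

lemma pairs_nil_of_short (xs : List Int) (cur : Nat) (h : xs.length ≤ cur + 1) :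
    (xs.drop cur).zip (xs.drop cur).tail = [] := by
  have : (xs.drop cur).length ≤ 1 := by simp; omega
  match hd : xs.drop cur with
  | [] => simp
  | [a] => simp
  | a :: b :: r => rw [hd] at this; simp at this

lemma loop_eq_goPairs (xs : List Int) (out : Int) (cur : Nat) (counts : Bool) :
    calcVolumeLoop xs out cur counts
      = out + goPairs ((xs.drop cur).zip (xs.drop cur).tail) counts := by
  fun_induction calcVolumeLoop xs out cur counts with
  | case1 out cur counts h h1 =>
    rw [pairs_nil_of_short xs cur (by omega)]; simp [goPairs]
  | case2 out cur counts h h1 h2 ih =>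
    rw [drop_pairs_cons xs cur (by omega), ih]
    simp only [goPairs, if_pos h2]; ring
  | case3 out cur h h1 h2 ih =>
    rw [drop_pairs_cons xs cur (by omega), ih]
    simp only [goPairs]
    rw [if_neg h2]; simp only [if_true]; ring
  | case4 out cur counts h h1 h2 h3 ih =>
    rw [drop_pairs_cons xs cur (by omega), ih]
    simp only [goPairs, if_neg h2, if_neg h3]
  | case5 out cur counts h =>
    rw [pairs_nil_of_short xs cur (by omega)]; simp [goPairs]

lemma goPairs_eq (ps : List (Int × Int)) (b : Bool) :
    goPairs ps b
      = (ps.countP (fun p => p.2 == p.1 + 1) : Int)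
        + paritySum ((ps.filter (fun p => p.2 != p.1 + 1)).map (fun p => p.2 - p.1)) b := by
  induction ps generalizing b with
  | nil => simp [goPairs, paritySum]
  | cons p ps ih =>
    by_cases hp : p.2 = p.1 + 1
    · simp [goPairs, hp, List.countP_cons, ih b, paritySum]; ring
    · cases b <;> simp [goPairs, hp, List.countP_cons, ih, paritySum] <;> ring

lemma zipIdx_sum_eq_paritySum (gs : List Int) (k : Nat) :
    ((gs.zipIdx k).map (fun gi => if gi.2 % 2 == 0 then gi.1 + 1 else 0)).sum
      = paritySum gs (k % 2 == 0) := by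
  induction gs generalizing k with
  | nil => simp [paritySum]
  | cons g gs ih =>
    have hk : ((k+1) % 2 == 0) = !(k % 2 == 0) := by
      rcases Nat.mod_two_eq_zero_or_one k with h | h <;> simp [Nat.add_mod, h]
    simp only [List.zipIdx_cons, List.map_cons, List.sum_cons, ih (k+1), hk, paritySum]

-- ===== VERDICT (by name: the statement is the Claim_ definition above) =====
theorem calcVolume_spec : Claim_equal_calcVolume := by
  intro xs _
  show calcVolume xs = calcVolume_alt xs
  rw [calcVolume, loop_eq_goPairs]
  simp only [List.drop_zero, goPairs_eq]
  rw [calcVolume_alt]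
  rw [zipIdx_sum_eq_paritySum
    (((xs.zip xs.tail).filter (fun p => p.2 != p.1 + 1)).map (fun p => p.2 - p.1)) 0]
  norm_num
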